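-- pv_equiv track=rewrite | github.com/StarAbhi/StarAbhi | string/sub.py | solution
-- ===== SOURCE A (Python) =====
-- def solution(s):
--     diff=0
--     st=0
--     en=0
--     for i in range(0,len(s)):
--         e=i
--         for j in range(1,len(s)):
--             if(s[i]==s[j]):
--                 e=j
--                 if diff<(e-i):
--                     diff=e-i
--                     st=i
--                     en=e
--     result=s[st:en+1]
--     return result
-- ===== SOURCE B (Python) =====
-- def solution(s):
--     first = {}
--     diff = 0
--     st = 0
--     en = 0
--     for i, c in enumerate(s):
--         f = first.setdefault(c, i)
--         if diff < i - f:
--             diff = i - f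
--             st = f
--             en = i
--     return s[st:en+1]
-- ===== Notes on version B (the rewrite author's own statement) =====
-- stated objective: faster
-- what changed: replaces the O(n^2) nested index scan with a single pass that keeps a dict of each character's first occurrence and maximizes i - first[c] with the same strict-improvement tie-break
import Mathlib
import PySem

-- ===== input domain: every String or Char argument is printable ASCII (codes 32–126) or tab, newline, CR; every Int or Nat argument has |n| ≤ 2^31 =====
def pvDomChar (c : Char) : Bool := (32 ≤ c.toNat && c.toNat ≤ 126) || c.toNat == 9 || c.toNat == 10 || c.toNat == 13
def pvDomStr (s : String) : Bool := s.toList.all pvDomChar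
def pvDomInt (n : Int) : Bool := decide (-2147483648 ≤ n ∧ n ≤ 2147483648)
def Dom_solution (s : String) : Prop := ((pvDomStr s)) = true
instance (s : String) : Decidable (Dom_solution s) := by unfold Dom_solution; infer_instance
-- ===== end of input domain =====

-- B replaces A's O(n^2) nested index scan by one pass keeping each character's first occurrence in a dict.

-- ===== PORT A =====
-- literal transliteration of A: nested loops over range(0,n) / range(1,n), state (diff, st, en), inner state (e, diff, st, en)
def solution (s : String) : String :=
  let cs := s.toList
  let n : Int := (cs.length : Int)
  let r :=
    (PySem.List.pyRange 0 n 1).foldl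
      (fun (acc : Int × Int × Int) i =>
        let t :=
          (PySem.List.pyRange 1 n 1).foldl
            (fun (t : Int × Int × Int × Int) j =>
              if PySem.List.pyGetD cs i ' ' = PySem.List.pyGetD cs j ' ' then
                -- e = j; if diff < e - i: diff, st, en = e - i, i, e
                if t.2.1 < j - i then (j, j - i, i, j) else (j, t.2.1, t.2.2.1, t.2.2.2)
              else t)
            (i, acc.1, acc.2.1, acc.2.2)
        (t.2.1, t.2.2.1, t.2.2.2))
      (0, 0, 0)
  String.mk (PySem.List.slice cs (some r.2.1) (some (r.2.2 + 1)))

-- ===== PORT B =====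
-- literal transliteration of Source B: one pass over enumerate(s), dict 'first' of first occurrences,
-- f = first.setdefault(c, i); strict-improvement update of (diff, st, en)
def solution_alt (s : String) : String :=
  let cs := s.toList
  let r :=
    (PySem.List.enumerate cs 0).foldl
      (fun (acc : PySem.Dict Char Int × Int × Int × Int) p =>
        let f := acc.1.getD p.2 p.1           -- value returned by first.setdefault(c, i)
        let first := acc.1.setdefault p.2 p.1
        if acc.2.1 < p.1 - f then (first, p.1 - f, f, p.1)
        else (first, acc.2.1, acc.2.2.1, acc.2.2.2))
      (PySem.Dict.empty, 0, 0, 0)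
  String.mk (PySem.List.slice cs (some r.2.2.1) (some (r.2.2.2 + 1)))

-- ===== PRECONDITION & SPEC =====
def Spec_solution (s : String) (out : String) : Prop := out = solution_alt s
instance (s : String) (out : String) : Decidable (Spec_solution s out) := by unfold Spec_solution; infer_instance

-- ===== CLAIM (what is proved, stated in full; the proofs are below) =====
def Claim_equal_solution : Prop := ∀ (s : String), Dom_solution s → Spec_solution s (solution s)

-- ===== LEMMAS AND PROOFS =====

-- record step: keep the candidate (value, start, end) on a strict improvement of the value
def rstep (t u : Int × Int × Int) : Int × Int × Int := if t.1 < u.1 then u else t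

-- cs[k] (in-range view of the ports' pyGetD)
def chr (cs : List Char) (k : Nat) : Char := cs.getD k ' '
-- first / last index of the character cs[k]
def fcI (cs : List Char) (k : Nat) : Int := (cs.idxOf (chr cs k) : Int)
def lcI (cs : List Char) (k : Nat) : Int :=
  (cs.length : Int) - 1 - (cs.reverse.idxOf (chr cs k) : Int)

-- A's candidate sequence: for i, the farthest j with cs[j] = cs[i]
def aseq (cs : List Char) : List (Int × Int × Int) :=
  (List.range cs.length).map (fun k => (lcI cs k - k, (k : Int), lcI cs k))
-- B's candidate sequence: for j, the span back to the first occurrence of cs[j]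
def bseq (cs : List Char) : List (Int × Int × Int) :=
  (List.range cs.length).map (fun (k : Nat) => ((k : Int) - fcI cs k, fcI cs k, (k : Int)))

-- A's inner 'e' fold
def Efold (cs : List Char) (i : Int) (js : List Int) : Int :=
  js.foldl (fun e j => if PySem.List.pyGetD cs i ' ' = PySem.List.pyGetD cs j ' ' then j else e) i

-- generic: foldl congruence under an invariant
theorem foldl_congr_inv {α β : Type} (P : α → Prop) (f g : α → β → α) :
    ∀ (l : List β) (init : α), P init →
      (∀ acc x, x ∈ l → P acc → f acc x = g acc x ∧ P (g acc x)) →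
      l.foldl f init = l.foldl g init := by
  intro l
  induction l with
  | nil => intros; rfl
  | cons x xs ih =>
    intro init hP h
    obtain ⟨he, hp⟩ := h init x (by simp) hP
    simp only [List.foldl_cons, he]
    exact ih _ hp (fun acc y hy hPa => h acc y (by simp [hy]) hPa)

theorem Efold_mem (cs : List Char) (i : Int) :
    ∀ (js : List Int) (e0 : Int),
      js.foldl (fun e j => if PySem.List.pyGetD cs i ' ' = PySem.List.pyGetD cs j ' ' then j else e) e0 = e0 ∨
      js.foldl (fun e j => if PySem.List.pyGetD cs i ' ' = PySem.List.pyGetD cs j ' ' then j else e) e0 ∈ js := by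
  intro js
  induction js with
  | nil => intro e0; left; rfl
  | cons j js ih =>
    intro e0
    simp only [List.foldl_cons]
    by_cases hm : PySem.List.pyGetD cs i ' ' = PySem.List.pyGetD cs j ' '
    · rcases ih (if PySem.List.pyGetD cs i ' ' = PySem.List.pyGetD cs j ' ' then j else e0) with h | h
      · right; rw [h, if_pos hm]; exact List.mem_cons_self
      · right; exact List.mem_cons_of_mem _ h
    · rcases ih (if PySem.List.pyGetD cs i ' ' = PySem.List.pyGetD cs j ' ' then j else e0) with h | h
      · rw [h, if_neg hm]; left; rfl
      · right; exact List.mem_cons_of_mem _ h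

-- characterization of Efold: i if no match, else the last (greatest) matching index
theorem Efold_spec (cs : List Char) (i : Int) :
    ∀ js : List Int, js.Pairwise (· < ·) →
      (Efold cs i js = i ∧ ∀ j ∈ js, ¬ PySem.List.pyGetD cs i ' ' = PySem.List.pyGetD cs j ' ') ∨
      (Efold cs i js ∈ js ∧ PySem.List.pyGetD cs i ' ' = PySem.List.pyGetD cs (Efold cs i js) ' ' ∧
        ∀ j ∈ js, PySem.List.pyGetD cs i ' ' = PySem.List.pyGetD cs j ' ' → j ≤ Efold cs i js) := by
  intro js
  induction js using List.reverseRecOn with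
  | nil => intro _; left; exact ⟨rfl, by simp⟩
  | append_singleton ys y ih =>
    intro hpw
    have hpw' : ys.Pairwise (· < ·) := (List.pairwise_append.mp hpw).1
    have hlt : ∀ z ∈ ys, z < y := by
      intro z hz
      exact (List.pairwise_append.mp hpw).2.2 z hz y (by simp)
    have hE : Efold cs i (ys ++ [y]) =
        if PySem.List.pyGetD cs i ' ' = PySem.List.pyGetD cs y ' ' then y else Efold cs i ys := by
      simp [Efold, List.foldl_append]
    by_cases hm : PySem.List.pyGetD cs i ' ' = PySem.List.pyGetD cs y ' '
    · right
      rw [hE, if_pos hm]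
      refine ⟨by simp, hm, ?_⟩
      intro j hj hmj
      rcases List.mem_append.mp hj with h | h
      · exact le_of_lt (hlt j h)
      · simp at h; omega
    · rw [hE, if_neg hm]
      rcases ih hpw' with ⟨h1, h2⟩ | ⟨h1, h2, h3⟩
      · left
        refine ⟨h1, ?_⟩
        intro j hj
        rcases List.mem_append.mp hj with h | h
        · exact h2 j h
        · simp at h; rw [h]; exact hm
      · right
        refine ⟨List.mem_append_left _ h1, h2, ?_⟩
        intro j hj hmj
        rcases List.mem_append.mp hj with h | h
        · exact h3 j h hmj
        · simp at h; rw [h] at hmj; exact absurd hmj hm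

-- collapsing A's inner loop to a single rstep
theorem inner_collapse (cs : List Char) (i d st en : Int) (hd : 0 ≤ d) :
    ∀ js : List Int, js.Pairwise (· < ·) →
      js.foldl (fun (t : Int × Int × Int × Int) j =>
          if PySem.List.pyGetD cs i ' ' = PySem.List.pyGetD cs j ' ' then
            if t.2.1 < j - i then (j, j - i, i, j) else (j, t.2.1, t.2.2.1, t.2.2.2)
          else t) (i, d, st, en)
      = (Efold cs i js, rstep (d, st, en) (Efold cs i js - i, i, Efold cs i js)) := by
  intro js
  induction js using List.reverseRecOn with
  | nil =>
    intro _
    have : Efold cs i [] = i := rfl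
    rw [this]
    simp only [List.foldl_nil, rstep]
    rw [if_neg (by omega)]
  | append_singleton ys y ih =>
    intro hpw
    have hpw' : ys.Pairwise (· < ·) := (List.pairwise_append.mp hpw).1
    have hlt : ∀ z ∈ ys, z < y := by
      intro z hz
      exact (List.pairwise_append.mp hpw).2.2 z hz y (by simp)
    have hE : Efold cs i (ys ++ [y]) =
        if PySem.List.pyGetD cs i ' ' = PySem.List.pyGetD cs y ' ' then y else Efold cs i ys := by
      simp [Efold, List.foldl_append]
    rw [List.foldl_append, ih hpw', List.foldl_cons, List.foldl_nil]
    by_cases hm : PySem.List.pyGetD cs i ' ' = PySem.List.pyGetD cs y ' '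
    · rw [hE, if_pos hm]
      have hEy : Efold cs i ys ≤ y ∨ Efold cs i ys = i := by
        rcases Efold_mem cs i ys i with h | h
        · right; exact h
        · left; exact le_of_lt (hlt _ h)
      simp only [if_pos hm, rstep]
      split_ifs <;> simp_all <;> omega
    · rw [hE, if_neg hm]
      simp only [if_neg hm]

-- ===== facts about fcI / lcI =====

theorem chr_eq_getElem (cs : List Char) (k : Nat) (hk : k < cs.length) : chr cs k = cs[k] := by
  simp [chr, List.getD_eq_getElem?_getD, List.getElem?_eq_getElem hk]

theorem chr_mem (cs : List Char) (k : Nat) (hk : k < cs.length) : chr cs k ∈ cs := by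
  rw [chr_eq_getElem cs k hk]; exact List.getElem_mem hk

theorem fcI_nonneg (cs : List Char) (k : Nat) : 0 ≤ fcI cs k := Int.natCast_nonneg _

theorem fcI_lt (cs : List Char) (k : Nat) (hk : k < cs.length) : fcI cs k < cs.length := by
  have := List.idxOf_lt_length_of_mem (chr_mem cs k hk)
  simp only [fcI]
  exact_mod_cast this

theorem chr_fcI (cs : List Char) (k : Nat) (hk : k < cs.length) :
    chr cs (fcI cs k).toNat = chr cs k := by
  have h1 : cs.idxOf (chr cs k) < cs.length := List.idxOf_lt_length_of_mem (chr_mem cs k hk)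
  have : (fcI cs k).toNat = cs.idxOf (chr cs k) := by simp [fcI]
  rw [this, chr_eq_getElem cs _ h1]
  exact List.getElem_idxOf h1

theorem fcI_min (cs : List Char) (k j : Nat) (hk : k < cs.length) (hj : j < cs.length)
    (h : chr cs j = chr cs k) : fcI cs k ≤ j := by
  have hmem : chr cs k ∈ cs.take (j + 1) := by
    rw [← h, chr_eq_getElem cs j hj]
    have hlen : j < (cs.take (j + 1)).length := by simp [List.length_take]; omega
    have : (cs.take (j + 1))[j] = cs[j] := List.getElem_take
    rw [← this]
    exact List.getElem_mem hlen
  have := (List.mem_take_iff_idxOf_lt (chr_mem cs k hk)).mp hmem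
  simp only [fcI]
  omega

theorem fcI_le (cs : List Char) (k : Nat) (hk : k < cs.length) : fcI cs k ≤ k :=
  fcI_min cs k k hk hk rfl

theorem chr_rev_mem (cs : List Char) (k : Nat) (hk : k < cs.length) : chr cs k ∈ cs.reverse := by
  rw [List.mem_reverse]; exact chr_mem cs k hk

theorem rev_idx_lt (cs : List Char) (k : Nat) (hk : k < cs.length) :
    cs.reverse.idxOf (chr cs k) < cs.length := by
  have := List.idxOf_lt_length_of_mem (chr_rev_mem cs k hk)
  simpa using this

theorem lcI_lt (cs : List Char) (k : Nat) (hk : k < cs.length) : lcI cs k < cs.length := by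
  have := rev_idx_lt cs k hk
  simp only [lcI]; omega

theorem chr_lcI (cs : List Char) (k : Nat) (hk : k < cs.length) :
    chr cs (lcI cs k).toNat = chr cs k := by
  have hm := rev_idx_lt cs k hk
  have hrl : cs.reverse.idxOf (chr cs k) < cs.reverse.length := by simpa using hm
  have h1 : cs.reverse[cs.reverse.idxOf (chr cs k)] = chr cs k := List.getElem_idxOf hrl
  have h2 : cs.reverse[cs.reverse.idxOf (chr cs k)] =
      cs[cs.length - 1 - cs.reverse.idxOf (chr cs k)] := by
    rw [List.getElem_reverse]
  have h3 : (lcI cs k).toNat = cs.length - 1 - cs.reverse.idxOf (chr cs k) := by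
    simp only [lcI]; omega
  rw [h3, chr_eq_getElem cs _ (by omega), ← h2, h1]

theorem lcI_max (cs : List Char) (k j : Nat) (hk : k < cs.length) (hj : j < cs.length)
    (h : chr cs j = chr cs k) : (j : Int) ≤ lcI cs k := by
  have hmem : chr cs k ∈ cs.reverse.take (cs.length - 1 - j + 1) := by
    rw [← h, chr_eq_getElem cs j hj]
    have hrl : cs.length - 1 - j < cs.reverse.length := by simp; omega
    have hg : cs.reverse[cs.length - 1 - j] = cs[j] := by
      rw [List.getElem_reverse]
      congr 1
      omega
    have hlen : cs.length - 1 - j < (cs.reverse.take (cs.length - 1 - j + 1)).length := by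
      simp [List.length_take]; omega
    have : (cs.reverse.take (cs.length - 1 - j + 1))[cs.length - 1 - j] =
        cs.reverse[cs.length - 1 - j] := List.getElem_take
    rw [← hg, ← this]
    exact List.getElem_mem hlen
  have := (List.mem_take_iff_idxOf_lt (chr_rev_mem cs k hk)).mp hmem
  simp only [lcI]
  omega

theorem lcI_ge (cs : List Char) (k : Nat) (hk : k < cs.length) : (k : Int) ≤ lcI cs k :=
  lcI_max cs k k hk hk rfl

theorem fcI_congr (cs : List Char) (k j : Nat) (h : chr cs j = chr cs k) : fcI cs j = fcI cs k := by
  simp [fcI, h]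

theorem lcI_congr (cs : List Char) (k j : Nat) (h : chr cs j = chr cs k) : lcI cs j = lcI cs k := by
  simp [lcI, h]

-- pyGetD at a nonneg in-range index is chr
theorem pyGetD_chr (cs : List Char) (j : Int) (h0 : 0 ≤ j) :
    PySem.List.pyGetD cs j ' ' = chr cs j.toNat := by
  have : j = (j.toNat : Int) := by omega
  rw [this, PySem.List.pyGetD_natCast]
  rfl

-- Efold over the full inner range is the last occurrence
theorem Efold_eq_lcI (cs : List Char) (k : Nat) (hk : k < cs.length) :
    Efold cs (k : Int) (PySem.List.pyRange 1 (cs.length : Int) 1) = lcI cs k := by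
  have hpw := PySem.List.pairwise_lt_pyRange_one (a := 1) (b := (cs.length : Int))
  rcases Efold_spec cs (k : Int) (PySem.List.pyRange 1 (cs.length : Int) 1) hpw with
    ⟨h1, h2⟩ | ⟨h1, h2, h3⟩
  · -- no j in [1,n) matches cs[k]: then k = 0 and the char occurs only at 0
    have hk0 : k = 0 := by
      by_contra hne
      have hkm : (k : Int) ∈ PySem.List.pyRange 1 (cs.length : Int) 1 := by
        rw [PySem.List.mem_pyRange_one]; omega
      exact h2 _ hkm rfl
    subst hk0
    rw [h1]
    have hl0 : (lcI cs 0).toNat = 0 := by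
      by_contra hne
      have hlt := lcI_lt cs 0 hk
      have hge : (0 : Int) ≤ lcI cs 0 := lcI_ge cs 0 hk
      have hmem : (lcI cs 0 : Int) ∈ PySem.List.pyRange 1 (cs.length : Int) 1 := by
        rw [PySem.List.mem_pyRange_one]; omega
      refine h2 _ hmem ?_
      rw [pyGetD_chr cs _ (by omega), pyGetD_chr cs _ hge]
      rw [chr_lcI cs 0 hk]
      rfl
    have hge : (0 : Int) ≤ lcI cs 0 := lcI_ge cs 0 hk
    omega
  · -- there is a match: Efold is the greatest matching index = lcI
    set r := Efold cs (k : Int) (PySem.List.pyRange 1 (cs.length : Int) 1) with hr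
    rw [PySem.List.mem_pyRange_one] at h1
    have hchr : chr cs r.toNat = chr cs k := by
      rw [pyGetD_chr cs _ (by omega), pyGetD_chr cs _ (by omega)] at h2
      exact h2.symm
    have hrle : r ≤ lcI cs k := by
      have := lcI_max cs k r.toNat hk (by omega) hchr
      omega
    have hler : lcI cs k ≤ r := by
      have hlt := lcI_lt cs k hk
      have hge0 : (k : Int) ≤ lcI cs k := lcI_ge cs k hk
      by_cases h1' : 1 ≤ lcI cs k
      · refine h3 _ ?_ ?_
        · rw [PySem.List.mem_pyRange_one]; omega
        · rw [pyGetD_chr cs _ (by omega), pyGetD_chr cs _ (by omega)]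
          rw [chr_lcI cs k hk]
          simp
      · omega
    omega

theorem Efold_eq_lcI' (cs : List Char) (i : Int) (h0 : 0 ≤ i) (hlt : i < (cs.length : Int)) :
    Efold cs i (PySem.List.pyRange 1 (cs.length : Int) 1) = lcI cs i.toNat := by
  have hn : i.toNat < cs.length := by omega
  have hc : ((i.toNat : Nat) : Int) = i := by omega
  rw [← hc, Efold_eq_lcI cs i.toNat hn]
  all_goals congr 1

-- ===== A's program equals the rstep-fold over aseq =====

theorem outer_to_aseq (cs : List Char) :
    (PySem.List.pyRange 0 (cs.length : Int) 1).foldl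
      (fun (acc : Int × Int × Int) i =>
        rstep acc (Efold cs i (PySem.List.pyRange 1 (cs.length : Int) 1) - i, i,
          Efold cs i (PySem.List.pyRange 1 (cs.length : Int) 1)))
      ((0 : Int), (0 : Int), (0 : Int))
    = (aseq cs).foldl rstep (0, 0, 0) := by
  have hcong :
      (PySem.List.pyRange 0 (cs.length : Int) 1).foldl
        (fun (acc : Int × Int × Int) i =>
          rstep acc (Efold cs i (PySem.List.pyRange 1 (cs.length : Int) 1) - i, i,
            Efold cs i (PySem.List.pyRange 1 (cs.length : Int) 1)))
        ((0 : Int), (0 : Int), (0 : Int))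
      = (PySem.List.pyRange 0 (cs.length : Int) 1).foldl
          (fun (acc : Int × Int × Int) (i : Int) =>
            rstep acc (lcI cs i.toNat - i, i, lcI cs i.toNat))
          ((0 : Int), (0 : Int), (0 : Int)) := by
    apply PySem.List.foldl_congr_mem
    intro acc i hi
    rw [PySem.List.mem_pyRange_one] at hi
    rw [Efold_eq_lcI' cs i hi.1 hi.2]
  rw [hcong]
  rw [PySem.List.pyRange_one]
  have hcast : ((cs.length : Int) - 0).toNat = cs.length := by omega
  rw [hcast, List.foldl_map]
  rw [show (aseq cs).foldl rstep ((0:Int),(0:Int),(0:Int))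
      = (List.range cs.length).foldl
          (fun acc k => rstep acc (lcI cs k - k, (k : Int), lcI cs k)) (0, 0, 0) by
    rw [aseq, List.foldl_map]]
  apply PySem.List.foldl_congr_mem
  intro acc k _
  simp only [zero_add, Int.toNat_natCast]

theorem solution_eq_rsc (s : String) :
    solution s = String.mk (PySem.List.slice s.toList
      (some ((aseq s.toList).foldl rstep (0, 0, 0)).2.1)
      (some (((aseq s.toList).foldl rstep (0, 0, 0)).2.2 + 1))) := by
  have houter :
      (PySem.List.pyRange 0 ((s.toList.length : Int)) 1).foldl
      (fun (acc : Int × Int × Int) i =>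
        let t :=
          (PySem.List.pyRange 1 ((s.toList.length : Int)) 1).foldl
            (fun (t : Int × Int × Int × Int) j =>
              if PySem.List.pyGetD s.toList i ' ' = PySem.List.pyGetD s.toList j ' ' then
                if t.2.1 < j - i then (j, j - i, i, j) else (j, t.2.1, t.2.2.1, t.2.2.2)
              else t)
            (i, acc.1, acc.2.1, acc.2.2)
        (t.2.1, t.2.2.1, t.2.2.2))
      ((0 : Int), (0 : Int), (0 : Int))
      = (aseq s.toList).foldl rstep (0, 0, 0) := by
    have step1 :
        (PySem.List.pyRange 0 ((s.toList.length : Int)) 1).foldl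
      (fun (acc : Int × Int × Int) i =>
        let t :=
          (PySem.List.pyRange 1 ((s.toList.length : Int)) 1).foldl
            (fun (t : Int × Int × Int × Int) j =>
              if PySem.List.pyGetD s.toList i ' ' = PySem.List.pyGetD s.toList j ' ' then
                if t.2.1 < j - i then (j, j - i, i, j) else (j, t.2.1, t.2.2.1, t.2.2.2)
              else t)
            (i, acc.1, acc.2.1, acc.2.2)
        (t.2.1, t.2.2.1, t.2.2.2))
      ((0 : Int), (0 : Int), (0 : Int))
        = (PySem.List.pyRange 0 ((s.toList.length : Int)) 1).foldl
            (fun (acc : Int × Int × Int) i =>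
              rstep acc (Efold s.toList i (PySem.List.pyRange 1 ((s.toList.length : Int)) 1) - i, i,
                Efold s.toList i (PySem.List.pyRange 1 ((s.toList.length : Int)) 1)))
            ((0 : Int), (0 : Int), (0 : Int)) := by
      apply foldl_congr_inv (P := fun t : Int × Int × Int => 0 ≤ t.1)
      · exact le_refl 0
      · intro acc i _ hP
        obtain ⟨d, st, en⟩ := acc
        constructor
        · have := inner_collapse s.toList i d st en hP
            (PySem.List.pyRange 1 ((s.toList.length : Int)) 1)
            (PySem.List.pairwise_lt_pyRange_one _ _)
          simp only at this ⊢
          rw [this]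
        · simp only [rstep]
          split <;> dsimp only at hP ⊢ <;> omega
    rw [step1, outer_to_aseq]
  show String.mk (PySem.List.slice s.toList
      (some ((PySem.List.pyRange 0 ((s.toList.length : Int)) 1).foldl
      (fun (acc : Int × Int × Int) i =>
        let t :=
          (PySem.List.pyRange 1 ((s.toList.length : Int)) 1).foldl
            (fun (t : Int × Int × Int × Int) j =>
              if PySem.List.pyGetD s.toList i ' ' = PySem.List.pyGetD s.toList j ' ' then
                if t.2.1 < j - i then (j, j - i, i, j) else (j, t.2.1, t.2.2.1, t.2.2.2)
              else t)
            (i, acc.1, acc.2.1, acc.2.2)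
        (t.2.1, t.2.2.1, t.2.2.2))
      ((0 : Int), (0 : Int), (0 : Int))).2.1)
      (some (((PySem.List.pyRange 0 ((s.toList.length : Int)) 1).foldl
      (fun (acc : Int × Int × Int) i =>
        let t :=
          (PySem.List.pyRange 1 ((s.toList.length : Int)) 1).foldl
            (fun (t : Int × Int × Int × Int) j =>
              if PySem.List.pyGetD s.toList i ' ' = PySem.List.pyGetD s.toList j ' ' then
                if t.2.1 < j - i then (j, j - i, i, j) else (j, t.2.1, t.2.2.1, t.2.2.2)
              else t)
            (i, acc.1, acc.2.1, acc.2.2)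
        (t.2.1, t.2.2.1, t.2.2.2))
      ((0 : Int), (0 : Int), (0 : Int))).2.2 + 1))) = _
  rw [houter]

-- ===== B's program equals the rstep-fold over bseq =====

theorem B_main (full : List Char) :
    ∀ (suf pre : List Char) (d : PySem.Dict Char Int) (t : Int × Int × Int),
      full = pre ++ suf →
      (∀ c : Char, d.get? c = if c ∈ pre then some ((pre.idxOf c : Nat) : Int) else none) →
      ((PySem.List.enumerate suf (pre.length : Int)).foldl
          (fun (acc : PySem.Dict Char Int × Int × Int × Int) p =>
            let f := acc.1.getD p.2 p.1
            let first := acc.1.setdefault p.2 p.1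
            if acc.2.1 < p.1 - f then (first, p.1 - f, f, p.1)
            else (first, acc.2.1, acc.2.2.1, acc.2.2.2))
          (d, t)).2
      = ((List.range' pre.length suf.length).map
          (fun (k : Nat) => ((k : Int) - fcI full k, fcI full k, (k : Int)))).foldl rstep t := by
  intro suf
  induction suf with
  | nil =>
    intro pre d t _ _
    simp [PySem.List.enumerate_nil]
  | cons c suf ih =>
    intro pre d t hfull hinv
    subst hfull
    have hmlt : pre.length < (pre ++ c :: suf).length := by simp
    have hchr : chr (pre ++ c :: suf) pre.length = c := by
      rw [chr_eq_getElem _ pre.length hmlt]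
      rw [List.getElem_append_right (le_refl pre.length)]
      simp
    have hfcI : fcI (pre ++ c :: suf) pre.length = if c ∈ pre then ((pre.idxOf c : Nat) : Int) else (pre.length : Int) := by
      simp only [fcI, hchr]
      by_cases hc : c ∈ pre
      · rw [List.idxOf_append_of_mem hc, if_pos hc]
      · rw [List.idxOf_append_of_notMem hc, if_neg hc]
        simp [List.idxOf_cons_self]
    have hgetD : d.getD c (pre.length : Int) = fcI (pre ++ c :: suf) pre.length := by
      rw [PySem.Dict.getD_eq_get?_getD, hinv c, hfcI]
      by_cases hc : c ∈ pre <;> simp [hc]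
    have hinv' : ∀ x : Char, (d.setdefault c (pre.length : Int)).get? x =
        if x ∈ pre ++ [c] then some (((pre ++ [c]).idxOf x : Nat) : Int) else none := by
      intro x
      by_cases hc : c ∈ pre
      · have hcont : d.contains c = true := by
          rw [PySem.Dict.contains_eq_isSome_get?, hinv c, if_pos hc]; rfl
        rw [PySem.Dict.setdefault_of_contains _ _ hcont, hinv x]
        by_cases hx : x ∈ pre
        · rw [if_pos hx, if_pos (List.mem_append_left _ hx), List.idxOf_append_of_mem hx]
        · rw [if_neg hx]
          have : x ∉ pre ++ [c] := by
            simp only [List.mem_append, List.mem_singleton]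
            rintro (h | h)
            · exact hx h
            · rw [h] at hx; exact hx hc
          rw [if_neg this]
      · have hcont : d.contains c = false := by
          rw [PySem.Dict.contains_eq_isSome_get?, hinv c, if_neg hc]; rfl
        rw [PySem.Dict.setdefault_of_not_contains _ _ hcont]
        rw [PySem.Dict.get?_insert]
        by_cases hx : x = c
        · subst hx
          have hid : (pre ++ [x]).idxOf x = pre.length := by
            rw [List.idxOf_append_of_notMem hc]
            simp
          simp [hid]
        · rw [if_neg hx, hinv x]
          by_cases hxp : x ∈ pre
          · rw [if_pos hxp, if_pos (List.mem_append_left _ hxp), List.idxOf_append_of_mem hxp]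
          · rw [if_neg hxp, if_neg (by simp [hx, hxp])]
    have hrec := ih (pre ++ [c]) (d.setdefault c (pre.length : Int))
      (rstep t ((pre.length : Int) - fcI (pre ++ c :: suf) pre.length,
        fcI (pre ++ c :: suf) pre.length, (pre.length : Int)))
      (by simp) hinv'
    rw [PySem.List.enumerate_cons, List.foldl_cons]
    simp only [List.length_cons, List.range'_succ, List.map_cons, List.foldl_cons]
    rw [show ((pre ++ [c]).length : Int) = (pre.length : Int) + 1 by simp] at hrec
    rw [show (pre ++ [c]).length = pre.length + 1 by simp] at hrec
    rw [← hrec]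
    congr 1
    simp only [hgetD]
    unfold rstep
    by_cases hcond : t.1 < (pre.length : Int) - fcI (pre ++ c :: suf) pre.length
    · rw [if_pos hcond, if_pos hcond]
    · rw [if_neg hcond, if_neg hcond]

theorem solution_alt_eq_rsc (s : String) :
    solution_alt s = String.mk (PySem.List.slice s.toList
      (some ((bseq s.toList).foldl rstep (0, 0, 0)).2.1)
      (some (((bseq s.toList).foldl rstep (0, 0, 0)).2.2 + 1))) := by
  have h0 := B_main s.toList s.toList [] PySem.Dict.empty (0, 0, 0) rfl
    (by intro c; simp [PySem.Dict.get?_empty])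
  simp only [List.length_nil, Nat.cast_zero] at h0
  rw [← List.range_eq_range'] at h0
  have hb : ((PySem.List.enumerate s.toList 0).foldl
      (fun (acc : PySem.Dict Char Int × Int × Int × Int) p =>
        let f := acc.1.getD p.2 p.1
        let first := acc.1.setdefault p.2 p.1
        if acc.2.1 < p.1 - f then (first, p.1 - f, f, p.1)
        else (first, acc.2.1, acc.2.2.1, acc.2.2.2))
      (PySem.Dict.empty, 0, 0, 0)).2 = (bseq s.toList).foldl rstep (0, 0, 0) := by
    rw [bseq]
    exact h0
  show String.mk (PySem.List.slice s.toList
      (some ((PySem.List.enumerate s.toList 0).foldl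
      (fun (acc : PySem.Dict Char Int × Int × Int × Int) p =>
        let f := acc.1.getD p.2 p.1
        let first := acc.1.setdefault p.2 p.1
        if acc.2.1 < p.1 - f then (first, p.1 - f, f, p.1)
        else (first, acc.2.1, acc.2.2.1, acc.2.2.2))
      (PySem.Dict.empty, 0, 0, 0)).2.2.1)
      (some (((PySem.List.enumerate s.toList 0).foldl
      (fun (acc : PySem.Dict Char Int × Int × Int × Int) p =>
        let f := acc.1.getD p.2 p.1
        let first := acc.1.setdefault p.2 p.1
        if acc.2.1 < p.1 - f then (first, p.1 - f, f, p.1)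
        else (first, acc.2.1, acc.2.2.1, acc.2.2.2))
      (PySem.Dict.empty, 0, 0, 0)).2.2.2 + 1))) = _
  rw [show ((PySem.List.enumerate s.toList 0).foldl
      (fun (acc : PySem.Dict Char Int × Int × Int × Int) p =>
        let f := acc.1.getD p.2 p.1
        let first := acc.1.setdefault p.2 p.1
        if acc.2.1 < p.1 - f then (first, p.1 - f, f, p.1)
        else (first, acc.2.1, acc.2.2.1, acc.2.2.2))
      (PySem.Dict.empty, 0, 0, 0)).2.2.1 = (((PySem.List.enumerate s.toList 0).foldl
      (fun (acc : PySem.Dict Char Int × Int × Int × Int) p =>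
        let f := acc.1.getD p.2 p.1
        let first := acc.1.setdefault p.2 p.1
        if acc.2.1 < p.1 - f then (first, p.1 - f, f, p.1)
        else (first, acc.2.1, acc.2.2.1, acc.2.2.2))
      (PySem.Dict.empty, 0, 0, 0)).2).2.1 from rfl,
      show ((PySem.List.enumerate s.toList 0).foldl
      (fun (acc : PySem.Dict Char Int × Int × Int × Int) p =>
        let f := acc.1.getD p.2 p.1
        let first := acc.1.setdefault p.2 p.1
        if acc.2.1 < p.1 - f then (first, p.1 - f, f, p.1)
        else (first, acc.2.1, acc.2.2.1, acc.2.2.2))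
      (PySem.Dict.empty, 0, 0, 0)).2.2.2 = (((PySem.List.enumerate s.toList 0).foldl
      (fun (acc : PySem.Dict Char Int × Int × Int × Int) p =>
        let f := acc.1.getD p.2 p.1
        let first := acc.1.setdefault p.2 p.1
        if acc.2.1 < p.1 - f then (first, p.1 - f, f, p.1)
        else (first, acc.2.1, acc.2.2.1, acc.2.2.2))
      (PySem.Dict.empty, 0, 0, 0)).2).2.2 from rfl, hb]

-- ===== the two rstep-folds agree =====

def mxv (zs : List (Int × Int × Int)) (b : Int) : Int := zs.foldl (fun m t => max m t.1) b

theorem rsc_fst : ∀ (zs : List (Int × Int × Int)) (t0 : Int × Int × Int),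
    (zs.foldl rstep t0).1 = mxv zs t0.1 := by
  intro zs
  induction zs with
  | nil => intro t0; rfl
  | cons u zs ih =>
    intro t0
    simp only [List.foldl_cons, mxv]
    rw [show rstep t0 u = if t0.1 < u.1 then u else t0 from rfl]
    have := ih (if t0.1 < u.1 then u else t0)
    rw [this]
    simp only [mxv]
    congr 1
    split <;> simp [max_def] <;> omega

theorem mxv_le (m : Int) : ∀ (zs : List (Int × Int × Int)) (b : Int),
    b ≤ m → (∀ t ∈ zs, t.1 ≤ m) → mxv zs b ≤ m := by
  intro zs
  induction zs with
  | nil => intro b hb _; exact hb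
  | cons u zs ih =>
    intro b hb h
    simp only [mxv, List.foldl_cons]
    exact ih (max b u.1) (max_le hb (h u (by simp))) (fun t ht => h t (by simp [ht]))

theorem le_mxv (zs : List (Int × Int × Int)) (b : Int) :
    b ≤ mxv zs b ∧ ∀ t ∈ zs, t.1 ≤ mxv zs b := by
  exact PySem.List.le_foldl_max_int zs (fun t => t.1) b

theorem mxv_attained (zs : List (Int × Int × Int)) (b : Int) (h : b < mxv zs b) :
    ∃ t ∈ zs, t.1 = mxv zs b := by
  have heq : mxv zs b = (zs.map (fun t : Int × Int × Int => t.1)).foldl max b := by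
    rw [List.foldl_map]; rfl
  rcases PySem.List.foldl_max_mem (zs.map (fun t : Int × Int × Int => t.1)) b with hc | hc
  · rw [heq] at h; omega
  · rw [heq]
    rcases List.mem_map.mp hc with ⟨t, ht, hv⟩
    exact ⟨t, ht, hv⟩

theorem rsc_stay : ∀ (zs : List (Int × Int × Int)) (t0 : Int × Int × Int),
    ¬ t0.1 < mxv zs t0.1 → zs.foldl rstep t0 = t0 := by
  intro zs
  induction zs using List.reverseRecOn with
  | nil => intro t0 _; rfl
  | append_singleton zs u ih =>
    intro t0 h
    have hmx : mxv (zs ++ [u]) t0.1 = max (mxv zs t0.1) u.1 := by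
      simp [mxv, List.foldl_append]
    rw [hmx] at h
    have h1 : ¬ t0.1 < mxv zs t0.1 := by omega
    have h2 : u.1 ≤ t0.1 := by omega
    rw [List.foldl_append, ih t0 h1, List.foldl_cons, List.foldl_nil]
    simp [rstep]
    omega

theorem rsc_char : ∀ (zs : List (Int × Int × Int)) (t0 : Int × Int × Int),
    t0.1 < mxv zs t0.1 →
    zs.foldl rstep t0 = (zs.find? (fun t => decide (mxv zs t0.1 ≤ t.1))).getD t0 := by
  intro zs
  induction zs using List.reverseRecOn with
  | nil => intro t0 h; simp [mxv] at h
  | append_singleton zs u ih =>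
    intro t0 h
    have hmx : mxv (zs ++ [u]) t0.1 = max (mxv zs t0.1) u.1 := by
      simp [mxv, List.foldl_append]
    rw [List.foldl_append, List.foldl_cons, List.foldl_nil]
    by_cases hM : t0.1 < mxv zs t0.1
    · have hfst : (zs.foldl rstep t0).1 = mxv zs t0.1 := rsc_fst zs t0
      by_cases hu : mxv zs t0.1 < u.1
      · have hmxu : mxv (zs ++ [u]) t0.1 = u.1 := by rw [hmx]; omega
        have hnone : zs.find? (fun t => decide (mxv (zs ++ [u]) t0.1 ≤ t.1)) = none := by
          rw [List.find?_eq_none]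
          intro t ht
          have := (le_mxv zs t0.1).2 t ht
          simp [hmxu]; omega
        rw [List.find?_append, hnone]
        simp only [Option.none_or]
        have : (rstep (zs.foldl rstep t0) u) = u := by
          simp [rstep]; omega
        rw [this, hmxu]
        simp
      · have hmxu : mxv (zs ++ [u]) t0.1 = mxv zs t0.1 := by rw [hmx]; omega
        have hsome : (zs.find? (fun t => decide (mxv zs t0.1 ≤ t.1))).isSome := by
          rw [List.find?_isSome]
          obtain ⟨t, ht, hv⟩ := mxv_attained zs t0.1 hM
          exact ⟨t, ht, by simp [hv]⟩
        obtain ⟨v, hv⟩ := Option.isSome_iff_exists.mp hsome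
        have : rstep (zs.foldl rstep t0) u = zs.foldl rstep t0 := by
          simp [rstep]
          intro hlt
          rw [hfst] at hlt
          omega
        rw [this, ih t0 hM, hmxu, List.find?_append, hv]
        simp
    · have hu : t0.1 < u.1 := by rw [hmx] at h; omega
      have hmxu : mxv (zs ++ [u]) t0.1 = u.1 := by rw [hmx]; omega
      have hnone : zs.find? (fun t => decide (mxv (zs ++ [u]) t0.1 ≤ t.1)) = none := by
        rw [List.find?_eq_none]
        intro t ht
        have := (le_mxv zs t0.1).2 t ht
        simp [hmxu]; omega
      rw [rsc_stay zs t0 hM, List.find?_append, hnone]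
      have : rstep t0 u = u := by simp [rstep]; omega
      rw [this, hmxu]
      simp

theorem aseq_mem (cs : List Char) (k : Nat) (hk : k < cs.length) :
    (lcI cs k - k, (k : Int), lcI cs k) ∈ aseq cs := by
  rw [aseq]
  exact List.mem_map.mpr ⟨k, List.mem_range.mpr hk, rfl⟩

theorem bseq_mem (cs : List Char) (k : Nat) (hk : k < cs.length) :
    ((k : Int) - fcI cs k, fcI cs k, (k : Int)) ∈ bseq cs := by
  rw [bseq]
  exact List.mem_map.mpr ⟨k, List.mem_range.mpr hk, rfl⟩

theorem mxv_eq (cs : List Char) : mxv (aseq cs) 0 = mxv (bseq cs) 0 := by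
  have hA := le_mxv (aseq cs) 0
  have hB := le_mxv (bseq cs) 0
  apply le_antisymm
  · apply mxv_le
    · exact hB.1
    · intro t ht
      obtain ⟨k, hk, rfl⟩ : ∃ k, k < cs.length ∧ (lcI cs k - k, (k : Int), lcI cs k) = t := by
        rw [aseq] at ht
        rcases List.mem_map.mp ht with ⟨k, hkr, hkt⟩
        exact ⟨k, List.mem_range.mp hkr, hkt⟩
      have hjlt : (lcI cs k).toNat < cs.length := by
        have h1 := lcI_lt cs k hk
        have h2 := lcI_ge cs k hk
        omega
      have hchr : chr cs (lcI cs k).toNat = chr cs k := chr_lcI cs k hk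
      have hfcj : fcI cs (lcI cs k).toNat = fcI cs k := fcI_congr cs k _ hchr
      have hb := hB.2 _ (bseq_mem cs (lcI cs k).toNat hjlt)
      dsimp only at hb ⊢
      have hcast : (((lcI cs k).toNat : Nat) : Int) = lcI cs k := by
        have := lcI_ge cs k hk
        omega
      rw [hfcj, hcast] at hb
      have := fcI_le cs k hk
      omega
  · apply mxv_le
    · exact hA.1
    · intro t ht
      obtain ⟨k, hk, rfl⟩ : ∃ k, k < cs.length ∧ ((k : Int) - fcI cs k, fcI cs k, (k : Int)) = t := by
        rw [bseq] at ht
        rcases List.mem_map.mp ht with ⟨k, hkr, hkt⟩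
        exact ⟨k, List.mem_range.mp hkr, hkt⟩
      have hflt : (fcI cs k).toNat < cs.length := by
        have h1 := fcI_lt cs k hk
        have h2 := fcI_nonneg cs k
        omega
      have hchr : chr cs (fcI cs k).toNat = chr cs k := chr_fcI cs k hk
      have hlcj : lcI cs (fcI cs k).toNat = lcI cs k := lcI_congr cs k _ hchr
      have ha := hA.2 _ (aseq_mem cs (fcI cs k).toNat hflt)
      dsimp only at ha ⊢
      have hcast : (((fcI cs k).toNat : Nat) : Int) = fcI cs k := by
        have := fcI_nonneg cs k
        omega
      rw [hlcj, hcast] at ha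
      have := lcI_ge cs k hk
      omega

theorem rsc_aseq_bseq (cs : List Char) :
    (aseq cs).foldl rstep (0, 0, 0) = (bseq cs).foldl rstep (0, 0, 0) := by
  have hA := le_mxv (aseq cs) 0
  have hB := le_mxv (bseq cs) 0
  have hM := mxv_eq cs
  by_cases hpos : (0 : Int) < mxv (aseq cs) 0
  · rw [rsc_char (aseq cs) (0, 0, 0) hpos, rsc_char (bseq cs) (0, 0, 0) (hM ▸ hpos)]
    show (List.find? (fun t => decide (mxv (aseq cs) 0 ≤ t.1))
            ((List.range cs.length).map (fun k => (lcI cs k - k, (k : Int), lcI cs k)))).getD (0, 0, 0)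
       = (List.find? (fun t => decide (mxv (bseq cs) 0 ≤ t.1))
            ((List.range cs.length).map
              (fun (k : Nat) => ((k : Int) - fcI cs k, fcI cs k, (k : Int))))).getD (0, 0, 0)
    rw [← hM]
    rw [List.find?_map, List.find?_map]
    -- the A-side index search succeeds
    have hsome : (List.find? ((fun t : Int × Int × Int => decide (mxv (aseq cs) 0 ≤ t.1)) ∘
        (fun k => (lcI cs k - k, (k : Int), lcI cs k))) (List.range cs.length)).isSome := by
      rw [List.find?_isSome]
      obtain ⟨t, ht, hv⟩ := mxv_attained (aseq cs) 0 hpos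
      rw [aseq] at ht
      rcases List.mem_map.mp ht with ⟨k, hkr, hkt⟩
      refine ⟨k, hkr, ?_⟩
      simp only [Function.comp_apply, decide_eq_true_eq]
      rw [← hkt] at hv
      dsimp only at hv
      omega
    obtain ⟨k0, hk0⟩ := Option.isSome_iff_exists.mp hsome
    have hk0' := hk0
    rw [List.find?_eq_some_iff_getElem] at hk0'
    obtain ⟨hq0, i0, hi0, hgi0, hmin0⟩ := hk0'
    rw [List.getElem_range] at hgi0
    have hk0lt : k0 < cs.length := by
      have h1 := hi0
      simp only [List.length_range] at h1
      omega
    simp only [Function.comp_apply, decide_eq_true_eq] at hq0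
    have hmin : ∀ j, j < k0 → ¬ mxv (aseq cs) 0 ≤ lcI cs j - j := by
      intro j hj
      have h2 := hmin0 j (by omega)
      rw [List.getElem_range] at h2
      simpa using h2
    -- the value at k0 is exactly the max
    have hvk0 : lcI cs k0 - k0 = mxv (aseq cs) 0 := by
      have := hA.2 _ (aseq_mem cs k0 hk0lt)
      dsimp only at this
      omega
    -- k0 is a first occurrence
    have hfc0 : fcI cs k0 = (k0 : Int) := by
      by_contra hne
      have hle := fcI_le cs k0 hk0lt
      have hnn := fcI_nonneg cs k0
      have hflt : (fcI cs k0).toNat < cs.length := by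
        have := fcI_lt cs k0 hk0lt
        omega
      have hchr : chr cs (fcI cs k0).toNat = chr cs k0 := chr_fcI cs k0 hk0lt
      have hlcf : lcI cs (fcI cs k0).toNat = lcI cs k0 := lcI_congr cs k0 _ hchr
      have ha := hA.2 _ (aseq_mem cs (fcI cs k0).toNat hflt)
      dsimp only at ha
      rw [hlcf] at ha
      omega
    -- the B-side first achiever is the last occurrence of cs[k0]
    have hj0ge := lcI_ge cs k0 hk0lt
    have hj0lt := lcI_lt cs k0 hk0lt
    have hj0 : (((lcI cs k0).toNat : Nat) : Int) = lcI cs k0 := by omega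
    have hjlt : (lcI cs k0).toNat < cs.length := by omega
    have hchrj : chr cs (lcI cs k0).toNat = chr cs k0 := chr_lcI cs k0 hk0lt
    have hfcj : fcI cs (lcI cs k0).toNat = (k0 : Int) := by
      rw [fcI_congr cs k0 _ hchrj, hfc0]
    have hfindB : List.find? ((fun t : Int × Int × Int => decide (mxv (aseq cs) 0 ≤ t.1)) ∘
        (fun (k : Nat) => ((k : Int) - fcI cs k, fcI cs k, (k : Int)))) (List.range cs.length)
        = some (lcI cs k0).toNat := by
      rw [List.find?_eq_some_iff_getElem]
      refine ⟨?_, (lcI cs k0).toNat, by simpa using hjlt, List.getElem_range _, ?_⟩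
      · simp only [Function.comp_apply, decide_eq_true_eq]
        rw [hfcj, hj0]
        omega
      · intro j hj
        rw [List.getElem_range]
        simp only [Function.comp_apply, Bool.not_eq_eq_eq_not, Bool.not_true,
          decide_eq_false_iff_not]
        intro hqj
        have hjlt' : j < cs.length := by omega
        have hble := hB.2 _ (bseq_mem cs j hjlt')
        dsimp only at hble
        rw [← hM] at hble
        have hvj : (j : Int) - fcI cs j = mxv (aseq cs) 0 := by omega
        have hfnn := fcI_nonneg cs j
        have hflt2 : (fcI cs j).toNat < cs.length := by
          have := fcI_lt cs j hjlt'
          omega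
        have hchrf : chr cs (fcI cs j).toNat = chr cs j := chr_fcI cs j hjlt'
        have hlcf : lcI cs (fcI cs j).toNat = lcI cs j := lcI_congr cs j _ hchrf
        have hlgej := lcI_ge cs j hjlt'
        have ha2 := hA.2 _ (aseq_mem cs (fcI cs j).toNat hflt2)
        dsimp only at ha2
        rw [hlcf] at ha2
        have hvf : lcI cs (fcI cs j).toNat - ((fcI cs j).toNat : Int) = mxv (aseq cs) 0 := by
          rw [hlcf]
          omega
        have hfk0 : (fcI cs j).toNat < k0 := by omega
        exact hmin _ hfk0 (by omega)
    rw [hk0, hfindB]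
    simp only [Option.map_some, Option.getD_some]
    simp only [hfcj, hj0]
  · rw [rsc_stay (aseq cs) (0, 0, 0) hpos, rsc_stay (bseq cs) (0, 0, 0) (hM ▸ hpos)]

-- ===== VERDICT (by name: the statement is the Claim_ definition above) =====
theorem solution_spec : Claim_equal_solution := by
  intro s _
  unfold Spec_solution
  rw [solution_eq_rsc, solution_alt_eq_rsc, rsc_aseq_bseq]
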